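-- pv_equiv track=rewrite | github.com/ff-derEchte/bs | main.py | convert
-- ===== SOURCE A (Python) =====
-- def convert(s_lines: list):
--     lines = []
--     for s in s_lines:
--         temp = s.split(' ')
--         temp2 = []
--         f = True
--         for word in temp:
--             if word == '' and f:
--                 continue
--             else:
--                 temp2.append(word)
--                 f = False
--         lines.append(temp2)
--     return lines
-- ===== SOURCE B (Python) =====
-- def convert(s_lines: list):
--     # lstrip the spaces first, then split; an empty/all-space line yields []
--     return [t.split(' ') if t else [] for t in (s.lstrip(' ') for s in s_lines)]
-- ===== Notes on version B (the rewrite author's own statement) =====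
-- stated objective: simpler
-- what changed: Replaces the per-token flag loop that filters leading empty tokens with lstrip(' ') on the string before splitting (guarding the empty result), collapsing the nested loops into one comprehension.
import Mathlib
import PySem

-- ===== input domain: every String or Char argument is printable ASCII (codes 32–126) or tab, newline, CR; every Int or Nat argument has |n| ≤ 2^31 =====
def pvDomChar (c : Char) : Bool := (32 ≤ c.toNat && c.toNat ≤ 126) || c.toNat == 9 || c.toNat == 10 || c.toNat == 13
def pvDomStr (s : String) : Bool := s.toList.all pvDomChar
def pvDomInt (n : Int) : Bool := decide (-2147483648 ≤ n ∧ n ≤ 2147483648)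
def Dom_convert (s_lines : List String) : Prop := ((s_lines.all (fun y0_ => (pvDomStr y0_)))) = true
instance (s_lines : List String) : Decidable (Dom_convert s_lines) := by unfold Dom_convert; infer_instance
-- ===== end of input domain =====

-- B replaces A's per-token flag loop (which filters the leading empty tokens) by
-- stripping the leading spaces from the line first and splitting the stripped string:
-- simpler, one pass per line, no inner flag loop.

-- ===== PORT A =====
-- inner loop of A: over the tokens of one line, state (temp2, f)
def convertLine (temp : List (List Char)) : List String × Bool :=
  temp.foldl (fun st word =>
    if word = [] ∧ st.2 = true then st
    else (st.1 ++ [String.ofList word], false)) ([], true)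

def convert (s_lines : List String) : List (List String) :=
  s_lines.foldl (fun lines s =>
    lines ++ [(convertLine (PySem.Chars.splitOn s.toList [' '])).1]) []

-- ===== PORT B =====
def convert_alt (s_lines : List String) : List (List String) :=
  s_lines.map (fun s =>
    -- s.lstrip(' ') drops exactly the leading ' ' characters (exact port)
    let t := s.toList.dropWhile (· == ' ')
    if t = [] then [] else (PySem.Chars.splitOn t [' ']).map String.ofList)

-- ===== PRECONDITION & SPEC =====
def Spec_convert (s_lines : List String) (out : List (List String)) : Prop := out = convert_alt s_lines
instance (s_lines : List String) (out : List (List String)) : Decidable (Spec_convert s_lines out) := by unfold Spec_convert; infer_instance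

-- ===== CLAIM (what is proved, stated in full; the proofs are below) =====
def Claim_equal_convert : Prop := ∀ (s_lines : List String), Dom_convert s_lines → Spec_convert s_lines (convert s_lines)

-- ===== LEMMAS AND PROOFS =====

-- PySem.Chars.splitOn with a single-char separator is Mathlib's List.splitOn
theorem splitOn_go_spec (c : Char) : ∀ (fuel : Nat) (l cur : List Char) (acc : List (List Char)),
    l.length < fuel →
    PySem.Chars.splitOn.go [c] fuel l cur acc
      = acc.reverse ++ (List.splitOn c l).modifyHead (cur.reverse ++ ·) := by
  intro fuel
  induction fuel with
  | zero => intro l cur acc h; omega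
  | succ f ih =>
    intro l cur acc h
    cases l with
    | nil => simp [PySem.Chars.splitOn.go, List.splitOn, List.splitOnP_nil]
    | cons x xs =>
      by_cases hx : x = c
      · subst hx
        rw [show PySem.Chars.splitOn.go [x] (f+1) (x :: xs) cur acc
              = PySem.Chars.splitOn.go [x] f xs [] (cur.reverse :: acc) from by
            simp [PySem.Chars.splitOn.go, List.isPrefixOf]]
        rw [ih xs [] (cur.reverse :: acc) (by simpa using h)]
        simp [List.splitOn, List.splitOnP_cons]
        exact congrFun List.modifyHead_id _
      · rw [show PySem.Chars.splitOn.go [c] (f+1) (x :: xs) cur acc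
              = PySem.Chars.splitOn.go [c] f xs (x :: cur) acc from by
            simp [PySem.Chars.splitOn.go, List.isPrefixOf]
            intro hcx; exact absurd hcx.symm hx]
        rw [ih xs (x :: cur) acc (by simpa using h)]
        have hne := List.splitOnP_ne_nil (fun a => a == c) xs
        rcases hxs : List.splitOnP (fun a => a == c) xs with _ | ⟨h1, t1⟩
        · exact absurd hxs hne
        · simp [List.splitOn, List.splitOnP_cons, hx, hxs]

theorem splitOn_single (c : Char) (s : List Char) :
    PySem.Chars.splitOn s [c] = List.splitOn c s := by
  unfold PySem.Chars.splitOn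
  rw [splitOn_go_spec c (s.length + 1) s [] [] (by omega)]
  simp only [List.reverse_nil, List.nil_append]
  exact congrFun List.modifyHead_id _

-- A's inner loop once the flag is off: it appends every remaining token
theorem convertLine_false (ts : List (List Char)) : ∀ (acc : List String),
    ts.foldl (fun st word =>
        if word = [] ∧ st.2 = true then st
        else (st.1 ++ [String.ofList word], false)) (acc, false)
      = (acc ++ ts.map String.ofList, false) := by
  induction ts with
  | nil => simp
  | cons w ws ih => intro acc; simp [ih]

-- A's inner loop: it drops exactly the leading empty tokens
theorem convertLine_eq (ts : List (List Char)) :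
    (convertLine ts).1 = (ts.dropWhile (· == [])).map String.ofList := by
  induction ts with
  | nil => simp [convertLine]
  | cons w ws ih =>
    by_cases hw : w = []
    · subst hw
      simpa [convertLine, List.dropWhile_cons] using ih
    · simp [convertLine, hw, convertLine_false ws [String.ofList w]]

-- the key fact: dropping leading empty tokens of splitOn = splitOn of the space-stripped string
theorem dropWhile_splitOn (s : List Char) :
    (List.splitOn ' ' s).dropWhile (· == [])
      = if s.dropWhile (· == ' ') = [] then []
        else List.splitOn ' ' (s.dropWhile (· == ' ')) := by
  induction s with
  | nil => simp [List.splitOn, List.splitOnP_nil]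
  | cons x xs ih =>
    by_cases hx : x = ' '
    · subst hx
      simpa [List.splitOn, List.splitOnP_cons, List.dropWhile_cons] using ih
    · have hne := List.splitOnP_ne_nil (fun a => a == ' ') xs
      rcases hxs : List.splitOnP (fun a => a == ' ') xs with _ | ⟨h1, t1⟩
      · exact absurd hxs hne
      · simp [List.splitOn, List.splitOnP_cons, hx, hxs]

-- per-line agreement
theorem line_eq (s : String) :
    (convertLine (PySem.Chars.splitOn s.toList [' '])).1
      = (let t := s.toList.dropWhile (· == ' ');
         if t = [] then [] else (PySem.Chars.splitOn t [' ']).map String.ofList) := by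
  rw [convertLine_eq, splitOn_single, dropWhile_splitOn]
  by_cases h : s.toList.dropWhile (· == ' ') = [] <;>
    simp [h, splitOn_single]

-- ===== VERDICT (by name: the statement is the Claim_ definition above) =====
theorem convert_spec : Claim_equal_convert := by
  intro s_lines _
  unfold Spec_convert convert convert_alt
  rw [PySem.List.foldl_append_singleton_eq_map]
  exact List.map_congr_left (fun s _ => line_eq s)
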